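-- pv_equiv track=rewrite | github.com/huy-nguyen/2019-advent-of-code | day_04.py | get_all_repetition_sequence_lengths
-- ===== SOURCE A (Python) =====
-- from typing import List, MutableSequence, Dict, Union
--
-- def get_all_repetition_sequence_lengths(input: List[int]) -> List[int]:
--     prev_digit = None
--     current_sequence_length = 0
--     all_sequence_lengths: List[int] = []
--     is_inside_sequence = False
--     for current_digit in input:
--         if current_digit == prev_digit:
--             current_sequence_length += 1
--             is_inside_sequence = True
--         else:
--             if is_inside_sequence:
--                 current_sequence_length += 1
--                 all_sequence_lengths.append(current_sequence_length)
--                 current_sequence_length = 0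
--             is_inside_sequence = False
--         prev_digit = current_digit
--
--     if current_sequence_length > 0:
--         current_sequence_length += 1
--         all_sequence_lengths.append(current_sequence_length)
--     return all_sequence_lengths
-- ===== SOURCE B (Python) =====
-- from typing import List
--
-- def get_all_repetition_sequence_lengths(input: List[int]) -> List[int]:
--     # Staged passes: collect the change-point indices (where adjacent digits
--     # differ), form the run-boundary list, then take pairwise differences of
--     # consecutive boundaries and keep those >= 2.
--     n = len(input)
--     changes = [i for i, (a, b) in enumerate(zip(input, input[1:]), 1) if a != b]
--     bounds = [0] + changes + [n] if input else [0]
--     return [d for d in (b - a for a, b in zip(bounds, bounds[1:])) if d >= 2]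
-- ===== Notes on version B (the rewrite author's own statement) =====
-- stated objective: alternative
-- what changed: Replaces A's one-pass prev/inside/counter state machine by staged passes over indices: list the change points where adjacent digits differ, form the run-boundary list (zero, the change points, then the length), take pairwise differences of consecutive boundaries and keep those of at least 2.
import Mathlib
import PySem

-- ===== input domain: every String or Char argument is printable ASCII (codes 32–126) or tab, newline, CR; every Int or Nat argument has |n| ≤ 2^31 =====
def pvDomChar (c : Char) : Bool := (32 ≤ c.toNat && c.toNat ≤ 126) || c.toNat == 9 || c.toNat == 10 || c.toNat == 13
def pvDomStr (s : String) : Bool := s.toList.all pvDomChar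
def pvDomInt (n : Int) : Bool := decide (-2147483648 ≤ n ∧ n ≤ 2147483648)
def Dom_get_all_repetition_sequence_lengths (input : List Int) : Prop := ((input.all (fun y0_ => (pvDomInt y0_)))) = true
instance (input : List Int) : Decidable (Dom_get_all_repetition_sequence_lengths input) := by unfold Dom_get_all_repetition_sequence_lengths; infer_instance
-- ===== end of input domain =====

-- B replaces A's one-pass prev/inside/counter state machine by staged passes over
-- boundary INDICES: it first lists the change points (indices where adjacent digits
-- differ), then takes pairwise differences of consecutive run boundaries and keeps
-- those ≥ 2 (alternative decomposition, same cost).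

-- ===== PORT A =====
-- one iteration of A's for-loop body: state = (prev_digit, current_sequence_length, all_sequence_lengths, is_inside_sequence)
def stepA (st : Option Int × Int × List Int × Bool) (current : Int) : Option Int × Int × List Int × Bool :=
  let (prev, cur, acc, inside) := st
  if some current == prev then
    (some current, cur + 1, acc, true)
  else if inside then
    (some current, 0, acc ++ [cur + 1], false)
  else
    (some current, 0, acc, false)

def get_all_repetition_sequence_lengths (input : List Int) : List Int :=
  let st := input.foldl stepA ((none : Option Int), (0 : Int), ([] : List Int), false)
  let (_, cur, acc, _) := st
  if cur > 0 then acc ++ [cur + 1] else acc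

-- ===== PORT B =====
def get_all_repetition_sequence_lengths_alt (input : List Int) : List Int :=
  let n : Int := input.length
  -- changes = [i for i, (a, b) in enumerate(zip(input, input[1:]), 1) if a != b]
  let changes : List Int :=
    (PySem.List.enumerate (input.zip (PySem.List.slice input (some 1) none)) 1).filterMap
      (fun p => if p.2.1 ≠ p.2.2 then some p.1 else none)
  -- bounds = [0] + changes + [n] if input else [0]
  let bounds : List Int := if input ≠ [] then 0 :: changes ++ [n] else [0]
  -- [d for d in (b - a for a, b in zip(bounds, bounds[1:])) if d >= 2]
  ((bounds.zip (PySem.List.slice bounds (some 1) none)).map (fun p => p.2 - p.1)).filter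
    (fun d => decide (d ≥ 2))

-- ===== PRECONDITION & SPEC =====
def Spec_get_all_repetition_sequence_lengths (input : List Int) (out : List Int) : Prop := out = get_all_repetition_sequence_lengths_alt input
instance (input : List Int) (out : List Int) : Decidable (Spec_get_all_repetition_sequence_lengths input out) := by unfold Spec_get_all_repetition_sequence_lengths; infer_instance

-- ===== CLAIM (what is proved, stated in full; the proofs are below) =====
def Claim_equal_get_all_repetition_sequence_lengths : Prop := ∀ (input : List Int), Dom_get_all_repetition_sequence_lengths input → Spec_get_all_repetition_sequence_lengths input (get_all_repetition_sequence_lengths input)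

-- ===== LEMMAS AND PROOFS =====

-- reference machine: ref v n xs = pending run of value v with n extra matches seen, rest xs
def ref (v : Int) (n : Int) (xs : List Int) : List Int :=
  match xs with
  | [] => if n > 0 then [n + 1] else []
  | x :: t =>
    if x = v then ref v (n + 1) t
    else (if n > 0 then [n + 1] else []) ++ ref x 0 t

def refTop (xs : List Int) : List Int :=
  match xs with
  | [] => []
  | v :: t => ref v 0 t

-- A's post-loop finalisation, on the loop state
def finA (st : Option Int × Int × List Int × Bool) : List Int :=
  if st.2.1 > 0 then st.2.2.1 ++ [st.2.1 + 1] else st.2.2.1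

lemma stepA_run (xs : List Int) : ∀ (v n : Int) (acc : List Int), 0 ≤ n →
    finA (xs.foldl stepA (some v, n, acc, decide (0 < n))) = acc ++ ref v n xs := by
  induction xs with
  | nil =>
    intro v n acc hn
    simp only [List.foldl_nil, ref, finA]
    split_ifs with h
    · rfl
    · simp
  | cons x t ih =>
    intro v n acc hn
    rw [List.foldl_cons]
    by_cases hx : x = v
    · have hstep : stepA (some v, n, acc, decide (0 < n)) x
          = (some v, n + 1, acc, decide (0 < n + 1)) := by
        subst hx
        simp only [stepA, beq_self_eq_true, if_pos]
        have : (true : Bool) = decide (0 < n + 1) := by simp; omega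
        rw [← this]
      rw [hstep, ih v (n + 1) acc (by omega)]
      have : ref v n (x :: t) = ref v (n + 1) t := by rw [ref, if_pos hx]
      rw [this]
    · have hbeq : (some x == some v) = false := by simp [hx]
      by_cases hn0 : 0 < n
      · have hstep : stepA (some v, n, acc, decide (0 < n)) x
            = (some x, 0, acc ++ [n + 1], decide ((0:Int) < 0)) := by
          simp [stepA, hbeq, hn0]
        rw [hstep, ih x 0 (acc ++ [n + 1]) le_rfl]
        rw [ref, if_neg hx, if_pos hn0]
        simp
      · have hstep : stepA (some v, n, acc, decide (0 < n)) x
            = (some x, 0, acc, decide ((0:Int) < 0)) := by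
          simp [stepA, hbeq, hn0]
        rw [hstep, ih x 0 acc le_rfl]
        rw [ref, if_neg hx, if_neg hn0]
        simp

lemma A_eq_refTop (xs : List Int) : get_all_repetition_sequence_lengths xs = refTop xs := by
  cases xs with
  | nil => rfl
  | cons v t =>
    have h0 : get_all_repetition_sequence_lengths (v :: t)
        = finA ((v :: t).foldl stepA ((none : Option Int), (0 : Int), ([] : List Int), false)) := rfl
    rw [h0, List.foldl_cons]
    have h1 : stepA ((none : Option Int), (0 : Int), ([] : List Int), false) v
        = (some v, 0, [], decide ((0:Int) < 0)) := by
      simp [stepA]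
    rw [h1, stepA_run t v 0 [] le_rfl]
    rfl

-- B-side helpers for the proof: change points of a pair list, and filtered pairwise diffs
def chgP (c : Int) : List (Int × Int) → List Int
  | [] => []
  | (a, b) :: r => (if a ≠ b then [c] else []) ++ chgP (c + 1) r

def dfil (l : List Int) : List Int :=
  ((l.zip (PySem.List.slice l (some 1) none)).map (fun p => p.2 - p.1)).filter
    (fun d => decide (d ≥ 2))

lemma enum_filterMap_eq_chgP (ps : List (Int × Int)) : ∀ (c : Int),
    (PySem.List.enumerate ps c).filterMap
      (fun p => if p.2.1 ≠ p.2.2 then some p.1 else none) = chgP c ps := by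
  induction ps with
  | nil => intro c; simp [PySem.List.enumerate_nil, chgP]
  | cons p r ih =>
    intro c
    rw [PySem.List.enumerate_cons, List.filterMap_cons, chgP]
    by_cases h : p.1 ≠ p.2
    · rw [if_pos h, if_pos h, ih]; rfl
    · rw [if_neg h, if_neg h, ih]; rfl

lemma dfil_cons2 (a b : Int) (r : List Int) :
    dfil (a :: b :: r) = (if b - a ≥ 2 then [b - a] else []) ++ dfil (b :: r) := by
  unfold dfil
  rw [PySem.List.slice_from_one, PySem.List.slice_from_one]
  simp only [List.tail_cons, List.zip_cons_cons, List.map_cons, List.filter_cons]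
  by_cases h : b - a ≥ 2
  · rw [if_pos (by simpa using h), if_pos h]; rfl
  · rw [if_neg (by simpa using h), if_neg h]; rfl

lemma dfil_pair (a b : Int) :
    dfil [a, b] = if b - a ≥ 2 then [b - a] else [] := by
  unfold dfil
  rw [PySem.List.slice_from_one]
  simp only [List.tail_cons, List.zip_cons_cons, List.zip_nil_right, List.map_cons,
    List.map_nil, List.filter_cons, List.filter_nil]
  by_cases h : b - a ≥ 2
  · rw [if_pos (by simpa using h), if_pos h]
  · rw [if_neg (by simpa using h), if_neg h]

lemma main_run (t : List Int) : ∀ (x c d : Int),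
    dfil (c :: (chgP (d + 1) ((x :: t).zip t) ++ [d + 1 + (t.length : Int)])) = ref x (d - c) t := by
  induction t with
  | nil =>
    intro x c d
    simp only [List.zip_nil_right, chgP, List.nil_append, List.length_nil, Int.natCast_zero,
      add_zero, ref]
    rw [dfil_pair]
    by_cases h : d - c > 0
    · rw [if_pos (by omega), if_pos h]
      congr 1; omega
    · rw [if_neg (by omega), if_neg h]
  | cons y t' ih =>
    intro x c d
    have hz : (x :: y :: t').zip (y :: t') = (x, y) :: ((y :: t').zip t') := rfl
    rw [hz, chgP]
    by_cases hxy : x ≠ y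
    · rw [if_pos hxy]
      have hlen : d + 1 + ((y :: t').length : Int) = (d + 1) + 1 + (t'.length : Int) := by
        simp [List.length_cons]; ring
      rw [hlen]
      have hsh : (c :: ([d + 1] ++ chgP (d + 1 + 1) ((y :: t').zip t') ++ [d + 1 + 1 + (t'.length : Int)]))
          = c :: (d + 1) :: (chgP ((d + 1) + 1) ((y :: t').zip t') ++ [(d + 1) + 1 + (t'.length : Int)]) := by
        simp
      rw [hsh, dfil_cons2, ih y (d + 1) (d + 1)]
      have hr : ref x (d - c) (y :: t')
          = (if d - c > 0 then [d - c + 1] else []) ++ ref y 0 t' := by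
        rw [ref, if_neg (fun hh => hxy hh.symm)]
      rw [hr]
      have e0 : d + 1 - (d + 1) = (0 : Int) := by ring
      rw [e0]
      congr 1
      by_cases h : d - c > 0
      · rw [if_pos (show d + 1 - c ≥ 2 by omega), if_pos h]
        simp only [List.cons.injEq, and_true]
        omega
      · rw [if_neg (show ¬ d + 1 - c ≥ 2 by omega), if_neg h]
    · rw [if_neg hxy]
      rw [not_ne_iff] at hxy
      have hlen : d + 1 + ((y :: t').length : Int) = (d + 1) + 1 + (t'.length : Int) := by
        simp [List.length_cons]; ring
      have hsh : (c :: ([] ++ chgP (d + 1 + 1) ((y :: t').zip t') ++ [d + 1 + ((y :: t').length : Int)]))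
          = c :: (chgP ((d + 1) + 1) ((y :: t').zip t') ++ [(d + 1) + 1 + (t'.length : Int)]) := by
        rw [hlen]; simp
      rw [hsh, ih y c (d + 1)]
      rw [hxy, ref, if_pos rfl]
      rw [show d + 1 - c = d - c + 1 from by ring]

lemma B_eq_refTop (xs : List Int) : get_all_repetition_sequence_lengths_alt xs = refTop xs := by
  cases xs with
  | nil => rfl
  | cons v t =>
    unfold get_all_repetition_sequence_lengths_alt
    simp only [ne_eq, reduceCtorEq, not_false_eq_true, if_pos]
    rw [PySem.List.slice_from_one, List.tail_cons, enum_filterMap_eq_chgP]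
    show dfil (0 :: (chgP 1 ((v :: t).zip t) ++ [((v :: t).length : Int)])) = refTop (v :: t)
    have h1 : (1 : Int) = 0 + 1 := by ring
    rw [h1]
    have hlen : ((v :: t).length : Int) = 0 + (0 + 1) + (t.length : Int) := by
      simp only [List.length_cons]; push_cast; ring
    rw [hlen]
    have h := main_run t v 0 0
    rw [show (0 : Int) + 1 + (t.length : Int) = 0 + (0 + 1) + (t.length : Int) from by ring] at h
    rw [h]
    norm_num [refTop]

-- ===== VERDICT (by name: the statement is the Claim_ definition above) =====
theorem get_all_repetition_sequence_lengths_spec : Claim_equal_get_all_repetition_sequence_lengths := by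
  intro input _
  unfold Spec_get_all_repetition_sequence_lengths
  rw [A_eq_refTop, B_eq_refTop]
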